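-- pv_equiv track=rewrite | github.com/liskos/kudryshov | ege6/177.py | f
-- ===== SOURCE A (Python) =====
-- def f(s):
--     s = s // 9
--     n = 12
--     while s < 220:
--         if (s +n) % 3 == 0:
--             s = s + 7
--         n = n + 17
--     return n
-- ===== SOURCE B (Python) =====
-- def f(s):
--     s0 = s // 9
--     if s0 >= 220:
--         return 12
--     k = s0 % 3
--     fires = (220 - s0 + 6) // 7
--     return 12 + 17 * (k + fires)
-- ===== Notes on version B (the rewrite author's own statement) =====
-- stated objective: faster
-- what changed: Replaced the iteration-by-iteration while-loop with a closed-form computation: the number of unchanged lead-in iterations comes from a mod-three residue and the number of incrementing iterations from one ceiling division, and the result is the start value plus the step times that total.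
import Mathlib
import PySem

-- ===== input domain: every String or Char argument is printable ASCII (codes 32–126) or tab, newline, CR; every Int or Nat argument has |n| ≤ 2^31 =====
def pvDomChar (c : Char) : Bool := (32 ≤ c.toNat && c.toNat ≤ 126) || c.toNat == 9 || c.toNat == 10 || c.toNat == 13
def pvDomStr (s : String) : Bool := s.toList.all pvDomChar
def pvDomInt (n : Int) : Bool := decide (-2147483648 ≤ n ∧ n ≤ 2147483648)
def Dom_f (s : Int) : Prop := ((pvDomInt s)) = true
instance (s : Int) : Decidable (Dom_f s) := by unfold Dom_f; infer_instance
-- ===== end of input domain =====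

-- B computes the loop's result in closed form: constant-count arithmetic instead of A's scan, whose iteration count grows linearly in 220 - s//9 (objective: faster, asymptotic).

-- ===== PORT A =====
-- A's while loop, step for step; the Nat fuel is only a totality guard
-- (f passes 3*(220 - s0) + 3, which exceeds the loop's iteration count:
-- each iteration either adds 7 to s or strictly decreases (s+n) % 3).
def fLoop (fuel : Nat) (s n : Int) : Int :=
  match fuel with
  | 0 => n
  | fuel + 1 =>
    if s < 220 then
      if PySem.Int.mod (s + n) 3 = 0 then fLoop fuel (s + 7) (n + 17)
      else fLoop fuel s (n + 17)
    else n

def f (s : Int) : Int :=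
  let s0 := PySem.Int.floordiv s 9
  fLoop (3 * (220 - s0) + 3).toNat s0 12

-- ===== PORT B =====
def f_alt (s : Int) : Int :=
  let s0 := PySem.Int.floordiv s 9
  if s0 ≥ 220 then 12
  else
    let k := PySem.Int.mod s0 3
    let fires := PySem.Int.floordiv (220 - s0 + 6) 7
    12 + 17 * (k + fires)

-- ===== PRECONDITION & SPEC =====
def Spec_f (s : Int) (out : Int) : Prop := out = f_alt s
instance (s : Int) (out : Int) : Decidable (Spec_f s out) := by unfold Spec_f; infer_instance

-- ===== CLAIM (what is proved, stated in full; the proofs are below) =====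
def Claim_equal_f : Prop := ∀ (s : Int), Dom_f s → Spec_f s (f s)

-- ===== LEMMAS AND PROOFS =====

-- closed-form characterisation of the loop, for any sufficient fuel
theorem fLoop_closed : ∀ (fuel : Nat) (s n : Int),
    3 * (220 - s) + PySem.Int.mod (s + n) 3 < (fuel : Int) →
    fLoop fuel s n = if s < 220 then n + 17 * (PySem.Int.mod (s + n) 3 + (220 - s + 6) / 7) else n := by
  intro fuel
  induction fuel with
  | zero =>
    intro s n hf
    have hm := PySem.Int.mod_eq_emod_of_pos (a := s + n) (b := 3) (by omega)
    have : ¬ s < 220 := by omega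
    simp [fLoop, this]
  | succ fuel ih =>
    intro s n hf
    have hm := PySem.Int.mod_eq_emod_of_pos (a := s + n) (b := 3) (by omega)
    by_cases hs : s < 220
    · simp only [fLoop, hs, if_true]
      by_cases hz : PySem.Int.mod (s + n) 3 = 0
      · have hm2 := PySem.Int.mod_eq_emod_of_pos (a := s + 7 + (n + 17)) (b := 3) (by omega)
        rw [if_pos hz, ih (s + 7) (n + 17) (by omega)]
        by_cases h7 : s + 7 < 220
        · rw [if_pos h7]; omega
        · rw [if_neg h7]; omega
      · have hm2 := PySem.Int.mod_eq_emod_of_pos (a := s + (n + 17)) (b := 3) (by omega)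
        rw [if_neg hz, ih s (n + 17) (by omega), if_pos hs]
        omega
    · simp [fLoop, hs]

-- ===== VERDICT (by name: the statement is the Claim_ definition above) =====
theorem f_spec : Claim_equal_f := by
  intro s _
  unfold Spec_f f f_alt
  dsimp only
  set s0 := PySem.Int.floordiv s 9 with hs0
  have hm := PySem.Int.mod_eq_emod_of_pos (a := s0 + 12) (b := 3) (by omega)
  have hm3 := PySem.Int.mod_eq_emod_of_pos (a := s0) (b := 3) (by omega)
  rw [fLoop_closed _ s0 12 (by omega)]
  by_cases h : s0 < 220
  · have hd := PySem.Int.floordiv_eq_ediv_of_pos (a := 220 - s0 + 6) (b := 7) (by omega)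
    rw [if_pos h, if_neg (by omega)]
    omega
  · rw [if_neg h, if_pos (by omega)]
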